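-- pv_equiv track=rewrite | github.com/jur4ikoff/bmstu-python | sem_1/lab 12.py | check_chain
-- ===== SOURCE A (Python) =====
-- def check_chain(string):
--     string = string.replace(',', '').replace('.', '').replace('!', '').replace('?', '')
--     elements = string.split()
--     max_count = 1
--     count = 1
--     for i in range(1, len(elements)):
--         if len(elements[i]) > len(elements[i - 1]):
--             count += 1
--         else:
--             max_count = max(max_count, count)
--             count = 1
--     max_count = max(max_count, count)
--     return max_count
-- ===== SOURCE B (Python) =====
-- def check_chain(string):
--     for ch in ',.!?':
--         string = string.replace(ch, '')
--     lengths = [len(w) for w in string.split()]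
--     breaks = [i for i in range(1, len(lengths)) if lengths[i] <= lengths[i - 1]]
--     bounds = [0] + breaks + [len(lengths)]
--     best = 0
--     for a, b in zip(bounds, bounds[1:]):
--         best = max(best, b - a)
--     return max(best, 1)
-- ===== Notes on version B (the rewrite author's own statement) =====
-- stated objective: alternative
-- what changed: Instead of a running counter with reset and a running maximum, B collects the break positions (indices where a word's length fails to exceed its predecessor's), brackets them with virtual boundaries 0 and len, and returns the largest distance between consecutive boundaries, floored at 1.
import Mathlib
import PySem

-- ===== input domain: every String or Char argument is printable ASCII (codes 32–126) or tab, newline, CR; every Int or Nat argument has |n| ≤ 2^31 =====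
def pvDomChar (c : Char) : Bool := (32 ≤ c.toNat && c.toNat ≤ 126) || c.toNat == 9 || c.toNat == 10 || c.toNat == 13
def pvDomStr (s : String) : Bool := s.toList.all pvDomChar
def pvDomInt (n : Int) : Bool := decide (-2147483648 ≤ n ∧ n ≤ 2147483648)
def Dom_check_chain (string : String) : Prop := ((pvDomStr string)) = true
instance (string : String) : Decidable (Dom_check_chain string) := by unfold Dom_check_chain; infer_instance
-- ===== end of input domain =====

-- B rephrases A's running-counter-with-reset as: collect the break positions, bracket them with the
-- virtual boundaries 0 and len, and return the largest gap between consecutive boundaries, floored at 1.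

-- ===== PORT A =====
def check_chain (string : String) : Int :=
  let string := PySem.Str.replace (PySem.Str.replace (PySem.Str.replace (PySem.Str.replace string "," "") "." "") "!" "") "?" ""
  let elements := PySem.Str.split₀ string
  let st := (PySem.List.pyRange 1 (elements.length : Int)).foldl
    (fun (st : Int × Int) i =>
      if PySem.Str.len (PySem.List.pyGetD elements i "") > PySem.Str.len (PySem.List.pyGetD elements (i - 1) "") then
        (st.1, st.2 + 1)
      else
        (max st.1 st.2, 1))
    (1, 1)
  max st.1 st.2

-- ===== PORT B =====
def check_chain_alt (string : String) : Int :=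
  let string := [",", ".", "!", "?"].foldl (fun s ch => PySem.Str.replace s ch "") string
  let lengths := (PySem.Str.split₀ string).map PySem.Str.len
  let breaks := (PySem.List.pyRange 1 (lengths.length : Int)).filter
    (fun i => PySem.List.pyGetD lengths i 0 ≤ PySem.List.pyGetD lengths (i - 1) 0)
  let bounds := [(0 : Int)] ++ breaks ++ [(lengths.length : Int)]
  let best := (bounds.zip (bounds.drop 1)).foldl (fun best ab => max best (ab.2 - ab.1)) 0
  max best 1

-- ===== PRECONDITION & SPEC =====
def Spec_check_chain (string : String) (out : Int) : Prop := out = check_chain_alt string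
instance (string : String) (out : Int) : Decidable (Spec_check_chain string out) := by unfold Spec_check_chain; infer_instance

-- ===== CLAIM (what is proved, stated in full; the proofs are below) =====
def Claim_equal_check_chain : Prop := ∀ (string : String), Dom_check_chain string → Spec_check_chain string (check_chain string)

-- ===== LEMMAS AND PROOFS =====

-- step booleans of the length list: one Bool per adjacent pair, true iff the run continues there
def steps : List Int → List Bool
  | a :: b :: t => decide (a < b) :: steps (b :: t)
  | _ => []

-- positions (counting from j) of the false steps: the break positions
def falsePos : Int → List Bool → List Int
  | _, [] => []
  | j, b :: t => if b then falsePos (j + 1) t else j :: falsePos (j + 1) t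

-- B's final loop: largest gap between consecutive entries of a boundary list
def gfold (l : List Int) : Int :=
  (l.zip (l.drop 1)).foldl (fun best ab => max best (ab.2 - ab.1)) 0

lemma steps_length (a : Int) (t : List Int) : (steps (a :: t)).length = t.length := by
  induction t generalizing a with
  | nil => rfl
  | cons b t ih => simp [steps, ih b]

lemma steps_singleton_len (L : List Int) (h : L.length ≤ 1) : steps L = [] := by
  match L, h with
  | [], _ => rfl
  | [a], _ => rfl

lemma len_get (es : List String) (i : Int) :
    PySem.Str.len (PySem.List.pyGetD es i "") = PySem.List.pyGetD (es.map PySem.Str.len) i 0 := by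
  have h := PySem.List.pyGetD_map PySem.Str.len es i ""
  simpa using h.symm

lemma fm : ∀ (l : List (Int × Int)) (x y : Int),
    l.foldl (fun best ab => max best (ab.2 - ab.1)) (max x y)
    = max x (l.foldl (fun best ab => max best (ab.2 - ab.1)) y) := by
  intro l
  induction l with
  | nil => intro x y; rfl
  | cons d t ih =>
    intro x y
    simp only [List.foldl_cons, max_assoc, ih]

lemma gfold_cons_cons (a b : Int) (t : List Int) :
    gfold (a :: b :: t) = max (b - a) (gfold (b :: t)) := by
  simp only [gfold, List.zip_cons_cons, List.drop_succ_cons, List.drop_zero, List.foldl_cons]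
  rw [show max 0 (b - a) = max (b - a) 0 from max_comm _ _, fm]

lemma fold_eq : ∀ (m : Nat) (L : List Int) (k : Nat), L.length = k + m → ∀ st : Int × Int,
    (PySem.List.pyRange ((k : Int) + 1) (L.length : Int)).foldl
      (fun st i =>
        if PySem.List.pyGetD L (i - 1) 0 < PySem.List.pyGetD L i 0 then (st.1, st.2 + 1)
        else (max st.1 st.2, 1)) st
    = (steps (L.drop k)).foldl
        (fun st b => if b then (st.1, st.2 + 1) else (max st.1 st.2, 1)) st := by
  intro m
  induction m with
  | zero =>
    intro L k hlen st
    rw [PySem.List.pyRange_one_eq_nil (by omega : (L.length : Int) ≤ (k : Int) + 1)]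
    rw [steps_singleton_len _ (by simp [hlen])]
    rfl
  | succ m' ih =>
    intro L k hlen st
    match m', ih with
    | 0, _ =>
      rw [PySem.List.pyRange_one_eq_nil (by omega : (L.length : Int) ≤ (k : Int) + 1)]
      rw [steps_singleton_len _ (by simp [hlen])]
      rfl
    | Nat.succ m'', ih =>
      have hk1 : k + 1 < L.length := by omega
      have hk : k < L.length := by omega
      rw [PySem.List.pyRange_one_cons (by exact_mod_cast by omega : ((k : Int) + 1) < (L.length : Int))]
      rw [List.foldl_cons]
      have hdk : L.drop k = L[k] :: L.drop (k + 1) := List.drop_eq_getElem_cons hk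
      have hdk1 : L.drop (k + 1) = L[k + 1] :: L.drop (k + 2) := List.drop_eq_getElem_cons hk1
      rw [hdk, hdk1, show steps (L[k] :: L[k+1] :: L.drop (k+2)) = decide (L[k] < L[k+1]) :: steps (L[k+1] :: L.drop (k+2)) from rfl]
      rw [List.foldl_cons]
      have hget1 : PySem.List.pyGetD L ((k : Int) + 1) 0 = L[k + 1] := by
        rw [show ((k : Int) + 1) = ((k + 1 : Nat) : Int) by push_cast; ring, PySem.List.pyGetD_natCast]
        exact List.getD_eq_getElem _ _ hk1
      have hget0 : PySem.List.pyGetD L ((k : Int) + 1 - 1) 0 = L[k] := by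
        rw [show ((k : Int) + 1 - 1) = ((k : Nat) : Int) by ring, PySem.List.pyGetD_natCast]
        exact List.getD_eq_getElem _ _ hk
      rw [hget1, hget0]
      have := ih L (k + 1) (by omega) (if L[k] < L[k + 1] then (st.1, st.2 + 1) else (max st.1 st.2, 1))
      rw [show ((k : Int) + 1 + 1) = (((k + 1 : Nat) : Int) + 1) by push_cast; ring]
      rw [this, ← hdk1]
      by_cases h : L[k] < L[k + 1] <;> simp [h]

lemma breaks_eq : ∀ (m : Nat) (L : List Int) (k : Nat), L.length = k + m →
    (PySem.List.pyRange ((k : Int) + 1) (L.length : Int)).filter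
      (fun i => decide (PySem.List.pyGetD L i 0 ≤ PySem.List.pyGetD L (i - 1) 0))
    = falsePos ((k : Int) + 1) (steps (L.drop k)) := by
  intro m
  induction m with
  | zero =>
    intro L k hlen
    rw [PySem.List.pyRange_one_eq_nil (by omega : (L.length : Int) ≤ (k : Int) + 1)]
    rw [steps_singleton_len _ (by simp [hlen])]
    rfl
  | succ m' ih =>
    intro L k hlen
    match m', ih with
    | 0, _ =>
      rw [PySem.List.pyRange_one_eq_nil (by omega : (L.length : Int) ≤ (k : Int) + 1)]
      rw [steps_singleton_len _ (by simp [hlen])]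
      rfl
    | Nat.succ m'', ih =>
      have hk1 : k + 1 < L.length := by omega
      have hk : k < L.length := by omega
      rw [PySem.List.pyRange_one_cons (by exact_mod_cast by omega : ((k : Int) + 1) < (L.length : Int))]
      rw [List.filter_cons]
      have hdk : L.drop k = L[k] :: L.drop (k + 1) := List.drop_eq_getElem_cons hk
      have hdk1 : L.drop (k + 1) = L[k + 1] :: L.drop (k + 2) := List.drop_eq_getElem_cons hk1
      rw [hdk, hdk1, show steps (L[k] :: L[k+1] :: L.drop (k+2)) = decide (L[k] < L[k+1]) :: steps (L[k+1] :: L.drop (k+2)) from rfl]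
      have hget1 : PySem.List.pyGetD L ((k : Int) + 1) 0 = L[k + 1] := by
        rw [show ((k : Int) + 1) = ((k + 1 : Nat) : Int) by push_cast; ring, PySem.List.pyGetD_natCast]
        exact List.getD_eq_getElem _ _ hk1
      have hget0 : PySem.List.pyGetD L ((k : Int) + 1 - 1) 0 = L[k] := by
        rw [show ((k : Int) + 1 - 1) = ((k : Nat) : Int) by ring, PySem.List.pyGetD_natCast]
        exact List.getD_eq_getElem _ _ hk
      have hrec := ih L (k + 1) (by omega)
      rw [show ((k : Int) + 1 + 1) = (((k + 1 : Nat) : Int) + 1) by push_cast; ring] at *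
      simp only [hget1, hget0, hrec, ← hdk1, falsePos]
      by_cases h : L[k] < L[k + 1]
      · simp [h, not_le.mpr h]
      · simp [h, not_lt.mp h]

lemma core : ∀ (s : List Bool) (m c p j : Int), p ≤ j → c = j - p →
    (let st := s.foldl (fun (st : Int × Int) b => if b then (st.1, st.2 + 1) else (max st.1 st.2, 1)) (m, c);
     max st.1 st.2)
    = max m (gfold (p :: falsePos j s ++ [j + (s.length : Int)])) := by
  intro s
  induction s with
  | nil =>
    intro m c p j hpj hc
    simp only [List.foldl_nil, falsePos, List.nil_append, List.length_nil, Nat.cast_zero, add_zero,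
      List.cons_append]
    rw [gfold_cons_cons]
    have h1 : gfold [j] = 0 := rfl
    rw [h1, hc]
    have : max (j - p) 0 = j - p := by omega
    rw [this]
  | cons b t ih =>
    intro m c p j hpj hc
    cases b with
    | true =>
      simp only [List.foldl_cons, List.length_cons, falsePos, if_true]
      have hcast : j + ((t.length + 1 : Nat) : Int) = (j + 1) + (t.length : Int) := by push_cast; ring
      rw [hcast]
      exact ih m (c + 1) p (j + 1) (by omega) (by omega)
    | false =>
      simp only [List.foldl_cons, Bool.false_eq_true, if_false, List.length_cons, falsePos]
      have hcast : j + ((t.length + 1 : Nat) : Int) = (j + 1) + (t.length : Int) := by push_cast; ring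
      rw [hcast]
      have := ih (max m c) 1 j (j + 1) (by omega) (by omega)
      simp only [List.cons_append] at this ⊢
      rw [gfold_cons_cons, this, hc]
      omega

-- k = 0 corollaries in the exact shape the ports use
lemma fold_eq0 (L : List Int) (st : Int × Int) :
    (PySem.List.pyRange 1 (L.length : Int)).foldl
      (fun st i =>
        if PySem.List.pyGetD L (i - 1) 0 < PySem.List.pyGetD L i 0 then (st.1, st.2 + 1)
        else (max st.1 st.2, 1)) st
    = (steps L).foldl (fun st b => if b then (st.1, st.2 + 1) else (max st.1 st.2, 1)) st := by
  have h := fold_eq L.length L 0 (by omega) st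
  simpa using h

lemma breaks_eq0 (L : List Int) :
    (PySem.List.pyRange 1 (L.length : Int)).filter
      (fun i => decide (PySem.List.pyGetD L i 0 ≤ PySem.List.pyGetD L (i - 1) 0))
    = falsePos 1 (steps L) := by
  have h := breaks_eq L.length L 0 (by omega)
  simpa using h

-- main lemma: the two cores agree on any word list
lemma main (es : List String) :
    (let st := (PySem.List.pyRange 1 (es.length : Int)).foldl
      (fun (st : Int × Int) i =>
        if PySem.Str.len (PySem.List.pyGetD es i "") > PySem.Str.len (PySem.List.pyGetD es (i - 1) "") then
          (st.1, st.2 + 1)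
        else
          (max st.1 st.2, 1)) (1, 1)
     max st.1 st.2)
    = (let lengths := es.map PySem.Str.len
       let breaks := (PySem.List.pyRange 1 (lengths.length : Int)).filter
         (fun i => PySem.List.pyGetD lengths i 0 ≤ PySem.List.pyGetD lengths (i - 1) 0)
       let bounds := [(0 : Int)] ++ breaks ++ [(lengths.length : Int)]
       let best := (bounds.zip (bounds.drop 1)).foldl (fun best ab => max best (ab.2 - ab.1)) 0
       max best 1) := by
  cases es with
  | nil => decide
  | cons e rest =>
    simp only
    set L : List Int := (e :: rest).map PySem.Str.len with hL
    have hlen : ((e :: rest).length : Int) = (L.length : Int) := by simp [hL]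
    have hA :
        ((PySem.List.pyRange 1 ((e :: rest).length : Int)).foldl
          (fun (st : Int × Int) i =>
            if PySem.Str.len (PySem.List.pyGetD (e :: rest) i "") >
               PySem.Str.len (PySem.List.pyGetD (e :: rest) (i - 1) "") then (st.1, st.2 + 1)
            else (max st.1 st.2, 1)) (1, 1))
        = (steps L).foldl (fun (st : Int × Int) b => if b then (st.1, st.2 + 1) else (max st.1 st.2, 1)) (1, 1) := by
      rw [hlen, ← fold_eq0 L (1, 1)]
      apply PySem.List.foldl_congr_mem
      intro st i _
      simp only [len_get, gt_iff_lt, hL]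
    rw [hA, breaks_eq0 L]
    have hslen : (1 : Int) + ((steps L).length : Int) = (L.length : Int) := by
      have h2 : steps L = steps (PySem.Str.len e :: rest.map PySem.Str.len) := by rw [hL]; simp
      rw [h2, steps_length (PySem.Str.len e) (rest.map PySem.Str.len), hL]
      simp
      omega
    have hcore := core (steps L) 1 1 0 1 (by omega) (by omega)
    simp only at hcore
    rw [hslen] at hcore
    rw [hcore]
    exact max_comm _ _

-- ===== VERDICT (by name: the statement is the Claim_ definition above) =====
theorem check_chain_spec : Claim_equal_check_chain := by
  intro string _
  show check_chain string = check_chain_alt string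
  exact main (PySem.Str.split₀ (PySem.Str.replace (PySem.Str.replace (PySem.Str.replace
    (PySem.Str.replace string "," "") "." "") "!" "") "?" ""))
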